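-- pv_equiv track=rewrite | github.com/TubTubTub/a-level | preliminary_material/questions/1 recursive brackets.py | GetSubstring
-- ===== SOURCE A (Python) =====
-- def GetSubstring(String):
--     First = -1
--     Stack = 0
--
--     for Index, Char in enumerate(String):
--         if Char == "(" and First == -1:
--             First = Index
--
--         if Char == "(":
--             Stack += 1
--
--         elif Char == ")":
--             Stack -= 1
--
--             if Stack == 0:
--                 return String[First + 1 : Index], First, Index
-- ===== SOURCE B (Python) =====
-- def GetSubstring(String):
--     # B: two-pass table approach — build the cumulative bracket-balance table first,
--     # then scan it for the first ')' at global depth 0 (instead of A's single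
--     # early-returning counter loop that also tracks the first '(' as it goes).
--     bal = []
--     d = 0
--     for ch in String:
--         d += (ch == '(') - (ch == ')')
--         bal.append(d)
--     first = String.find('(')
--     for i, ch in enumerate(String):
--         if ch == ')' and bal[i] == 0:
--             return String[first + 1 : i], first, i
-- ===== Notes on version B (the rewrite author's own statement) =====
-- stated objective: alternative
-- what changed: Replaces A's single early-returning loop (running counter plus first-'(' tracking in loop state) by a two-pass table method: first build the cumulative bracket-balance table, compute the first '(' position separately with str.find, then scan for the first ')' whose table entry is 0.
-- outside the precondition, e.g. on GetSubstring('('): A returns None, B returns None; on GetSubstring(')'): A returns None, B returns None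
import Mathlib
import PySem

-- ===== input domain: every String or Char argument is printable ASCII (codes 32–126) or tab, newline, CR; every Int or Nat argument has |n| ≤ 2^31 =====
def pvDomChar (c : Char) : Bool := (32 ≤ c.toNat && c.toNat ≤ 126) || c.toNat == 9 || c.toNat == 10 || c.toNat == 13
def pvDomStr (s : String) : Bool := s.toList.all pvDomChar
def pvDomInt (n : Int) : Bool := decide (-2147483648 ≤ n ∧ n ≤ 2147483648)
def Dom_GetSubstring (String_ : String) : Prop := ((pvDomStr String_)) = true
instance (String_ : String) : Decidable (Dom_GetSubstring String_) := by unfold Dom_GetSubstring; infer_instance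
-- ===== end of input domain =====

-- B builds a cumulative bracket-balance table and then searches it, instead of A's
-- single early-returning counter loop; equal on Pre_ (where Python A returns a tuple).

-- ===== PORT A =====
-- A's loop over enumerate(String); early `return` modelled by Option (none = fall through,
-- i.e. Python returns None — excluded by Pre_).
def pvAGo (S : String) : List (Int × Char) → Int → Int → Option (String × Int × Int)
  | [], _, _ => none
  | (Index, Char_) :: rest, First0, Stack =>
      let First := if Char_ = '(' ∧ First0 = -1 then Index else First0
      if Char_ = '(' then pvAGo S rest First (Stack + 1)
      else if Char_ = ')' then
        let Stack' := Stack - 1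
        if Stack' = 0 then
          some (PySem.Str.slice S (some (First + 1)) (some Index), First, Index)
        else pvAGo S rest First Stack'
      else pvAGo S rest First Stack

def GetSubstring (String_ : String) : String × Int × Int :=
  (pvAGo String_ (PySem.List.enumerate String_.toList 0) (-1) 0).getD ("", -1, -1)

-- ===== PORT B =====
-- balance table: bal[i] = global depth after index i
def pvBalGo : List Char → Int → List Int
  | [], _ => []
  | ch :: rest, d =>
      let d' := d + ((if ch = '(' then (1 : Int) else 0) - (if ch = ')' then 1 else 0))
      d' :: pvBalGo rest d'

def pvBGo (S : String) (bal : List Int) (first : Int) :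
    List (Int × Char) → Option (String × Int × Int)
  | [] => none
  | (i, ch) :: rest =>
      -- bal[i]: the enumerate index is always in range, so the IndexError default is unreachable
      if ch = ')' ∧ (PySem.List.pyGet? bal i).getD 0 = 0 then
        some (PySem.Str.slice S (some (first + 1)) (some i), first, i)
      else pvBGo S bal first rest

def GetSubstring_alt (String_ : String) : String × Int × Int :=
  let bal := pvBalGo String_.toList 0
  let first := PySem.Str.find String_ "("
  (pvBGo String_ bal first (PySem.List.enumerate String_.toList 0)).getD ("", -1, -1)

-- ===== PRECONDITION & SPEC =====
def pvW (c : Char) : Int := if c = '(' then 1 else if c = ')' then -1 else 0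

-- Pre_ excludes exactly the inputs on which Python A falls off the loop and returns None
-- (no closing bracket at cumulative balance 0), which is not a value of the declared type.
def Pre_GetSubstring (String_ : String) : Prop :=
  ∃ i : Fin String_.toList.length, String_.toList.get i = ')' ∧
    ((String_.toList.take (i.1 + 1)).map pvW).sum = 0
instance (String_ : String) : Decidable (Pre_GetSubstring String_) := by
  unfold Pre_GetSubstring; infer_instance

def pvWitness_GetSubstring : String := "a(b)c"

def Spec_GetSubstring (String_ : String) (out : String × Int × Int) : Prop := out = GetSubstring_alt String_
instance (String_ : String) (out : String × Int × Int) : Decidable (Spec_GetSubstring String_ out) := by unfold Spec_GetSubstring; infer_instance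

-- ===== CLAIM (what is proved, stated in full; the proofs are below) =====
def Claim_equal_GetSubstring : Prop := ∀ (String_ : String), Dom_GetSubstring String_ → Pre_GetSubstring String_ → Spec_GetSubstring String_ (GetSubstring String_)

-- ===== LEMMAS AND PROOFS =====

def pvBsum (l : List Char) : Int := (l.map pvW).sum

-- B's increment expression equals the weight function
lemma pvW_eq (c : Char) :
    ((if c = '(' then (1 : Int) else 0) - (if c = ')' then 1 else 0)) = pvW c := by
  unfold pvW; split_ifs <;> simp_all

-- the balance table holds the prefix sums
lemma pvBal_get (l : List Char) : ∀ (k : Nat) (d : Int), k < l.length →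
    (pvBalGo l d)[k]? = some (d + pvBsum (l.take (k + 1))) := by
  induction l with
  | nil => intro k d h; simp at h
  | cons c rest ih =>
      intro k d h
      cases k with
      | zero => simp [pvBalGo, pvBsum, pvW_eq]
      | succ k =>
          have hk : k < rest.length := by simpa using h
          simp only [pvBalGo, List.getElem?_cons_succ]
          rw [ih k _ hk]
          simp only [List.take_succ_cons, pvBsum, List.map_cons, List.sum_cons, pvW_eq]
          ring_nf

-- a positive prefix balance forces a '(' in the prefix
lemma pvBsum_nonpos (l : List Char) (h : '(' ∉ l) : pvBsum l ≤ 0 := by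
  induction l with
  | nil => simp [pvBsum]
  | cons c rest ih =>
      simp only [List.mem_cons, not_or] at h
      have h1 : pvW c ≤ 0 := by unfold pvW; split_ifs <;> simp_all
      have h2 := ih h.2
      simp only [pvBsum, List.map_cons, List.sum_cons] at *
      omega

lemma pvBsum_pos_mem (l : List Char) (h : 0 < pvBsum l) : '(' ∈ l := by
  by_contra hmem
  have := pvBsum_nonpos l hmem
  omega

lemma singleton_prefix_iff (a : Char) (xs : List Char) : [a] <+: xs ↔ xs[0]? = some a := by
  cases xs with
  | nil => simp
  | cons x t => simp [List.cons_prefix_iff, eq_comm]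

-- characterisation of B's `first` = String.find('(') : it is the first index of '('
lemma pvFind_at (l : List Char) (k : Nat) (hk : k < l.length)
    (h1 : '(' ∉ l.take k) (h2 : l[k] = '(') : PySem.Chars.find l ['('] = (k : Int) := by
  have hmem : '(' ∈ l := h2 ▸ List.getElem_mem hk
  have hinf : ['('] <:+: l := by
    obtain ⟨s, t, rfl⟩ := List.mem_iff_append.mp hmem
    exact ⟨s, t, by simp⟩
  have hpos : (0 : Int) ≤ PySem.Chars.find l ['('] :=
    (PySem.Chars.find_nonneg_iff l ['(']).mpr hinf
  obtain ⟨hpre, hmin⟩ := PySem.Chars.find_spec hpos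
  set f := PySem.Chars.find l ['('] with hf
  rw [singleton_prefix_iff] at hpre
  have hget := List.getElem?_eq_some_iff.mp (by rwa [List.getElem?_drop, Nat.add_zero] at hpre)
  have hkf : ¬ f.toNat < k := by
    intro hlt
    exact h1 ((List.mem_take_iff_getElem).mpr ⟨f.toNat, by omega, by simp [hget.2]⟩)
  have hfk : ¬ k < f.toNat := by
    intro hlt
    apply hmin k hlt
    rw [singleton_prefix_iff, List.getElem?_drop, Nat.add_zero]
    exact List.getElem?_eq_some_iff.mpr ⟨hk, h2⟩
  omega

-- one-step unfolding lemmas for the two loops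
lemma pvAGo_cons_open (S : String) (rest : List (Int × Char)) (i F St : Int) :
    pvAGo S ((i, '(') :: rest) F St
      = pvAGo S rest (if F = -1 then i else F) (St + 1) := by
  simp [pvAGo]

lemma pvAGo_cons_close (S : String) (rest : List (Int × Char)) (i F St : Int) :
    pvAGo S ((i, ')') :: rest) F St
      = (if St - 1 = 0 then some (PySem.Str.slice S (some (F + 1)) (some i), F, i)
         else pvAGo S rest F (St - 1)) := by
  simp [pvAGo]

lemma pvAGo_cons_other (S : String) (rest : List (Int × Char)) (i F St : Int) (c : Char)
    (h1 : c ≠ '(') (h2 : c ≠ ')') :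
    pvAGo S ((i, c) :: rest) F St = pvAGo S rest F St := by
  simp [pvAGo, h1, h2]

lemma pvBGo_cons (S : String) (bal : List Int) (f : Int) (rest : List (Int × Char))
    (i : Int) (c : Char) :
    pvBGo S bal f ((i, c) :: rest)
      = if c = ')' ∧ (PySem.List.pyGet? bal i).getD 0 = 0 then
          some (PySem.Str.slice S (some (f + 1)) (some i), f, i)
        else pvBGo S bal f rest := rfl

lemma pvBGo_cons_skip (S : String) (bal : List Int) (f : Int) (rest : List (Int × Char))
    (i : Int) (c : Char) (h : ¬(c = ')' ∧ (PySem.List.pyGet? bal i).getD 0 = 0)) :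
    pvBGo S bal f ((i, c) :: rest) = pvBGo S bal f rest := by
  rw [pvBGo_cons, if_neg h]

-- main invariant lemma: from position k on, A's loop and B's search agree
lemma pv_main (S : String) :
    ∀ (t : List Char) (k : Nat) (First Stack : Int),
      S.toList.drop k = t →
      Stack = pvBsum (S.toList.take k) →
      First = (if '(' ∈ S.toList.take k then PySem.Chars.find S.toList ['('] else -1) →
      pvAGo S (PySem.List.enumerate t (k : Int)) First Stack
        = pvBGo S (pvBalGo S.toList 0) (PySem.Chars.find S.toList ['(']) (PySem.List.enumerate t (k : Int)) := by
  intro t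
  induction t with
  | nil => intro k First Stack _ _ _; simp [PySem.List.enumerate_nil, pvAGo, pvBGo]
  | cons c t' ih =>
      intro k First Stack hdrop hStack hFirst
      set l := S.toList with hl
      have hk : k < l.length := by
        by_contra h
        rw [List.drop_eq_nil_of_le (by omega)] at hdrop
        exact (List.cons_ne_nil _ _) hdrop.symm
      have hck : l[k]? = some c := by
        have h0 : (l.drop k)[0]? = some c := by rw [hdrop]; rfl
        rwa [List.getElem?_drop, Nat.add_zero] at h0
      have hgk : l[k] = c := (List.getElem?_eq_some_iff.mp hck).2
      have hdrop' : l.drop (k + 1) = t' := by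
        have h1 := congrArg (List.drop 1) hdrop
        simpa [List.drop_drop, Nat.add_comm] using h1
      have htake : l.take (k + 1) = l.take k ++ [c] := by
        rw [List.take_succ, hck]; simp
      have hbsum1 : pvBsum (l.take (k + 1)) = Stack + pvW c := by
        rw [htake, hStack]; simp [pvBsum]
      have hbal : (PySem.List.pyGet? (pvBalGo l 0) (k : Int)).getD 0 = Stack + pvW c := by
        rw [PySem.List.pyGet?_natCast, pvBal_get l k 0 hk, hbsum1]; simp
      rw [PySem.List.enumerate_cons]
      have hcast : (k : Int) + 1 = ((k + 1 : Nat) : Int) := by push_cast; ring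
      by_cases hc1 : c = '('
      · -- open bracket: A pushes, B skips
        subst hc1
        have hw : pvW '(' = 1 := by decide
        rw [pvAGo_cons_open, pvBGo_cons_skip (h := fun h => absurd h.1 (by decide)), hcast]
        have hmem1 : '(' ∈ l.take (k + 1) := by rw [htake]; simp
        by_cases hmem : '(' ∈ l.take k
        · have hF : First = PySem.Chars.find l ['('] := by rw [hFirst, if_pos hmem]
          have hpos : (0 : Int) ≤ PySem.Chars.find l ['('] := by
            rw [PySem.Chars.find_nonneg_iff]
            obtain ⟨s, t, heq⟩ := List.mem_iff_append.mp (List.mem_of_mem_take hmem)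
            exact ⟨s, t, by rw [heq]; simp⟩
          rw [if_neg (by rw [hF]; omega)]
          exact ih (k + 1) First (Stack + 1) hdrop'
            (by rw [hbsum1, hw]) (by rw [hFirst, if_pos hmem, if_pos hmem1])
        · have hfind : PySem.Chars.find l ['('] = (k : Int) := pvFind_at l k hk hmem hgk
          rw [if_pos (by rw [hFirst, if_neg hmem])]
          exact ih (k + 1) (k : Int) (Stack + 1) hdrop'
            (by rw [hbsum1, hw]) (by rw [if_pos hmem1, hfind])
      · by_cases hc2 : c = ')'
        · -- closing bracket: both test for cumulative balance 0
          subst hc2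
          have hw : pvW ')' = -1 := by decide
          rw [pvAGo_cons_close]
          by_cases hz : Stack - 1 = 0
          · rw [if_pos hz, pvBGo_cons, if_pos ⟨rfl, by rw [hbal, hw]; omega⟩]
            -- Stack = 1 > 0 forces a '(' in the prefix, so First is the global first '('
            have hmem : '(' ∈ l.take k := pvBsum_pos_mem _ (by rw [← hStack]; omega)
            rw [hFirst, if_pos hmem]
          · rw [if_neg hz,
                pvBGo_cons_skip (h := fun h => hz (by have h2 := h.2; rw [hbal, hw] at h2; omega)),
                hcast]
            have hiff : '(' ∈ l.take (k + 1) ↔ '(' ∈ l.take k := by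
              rw [htake]; simp [show ¬(('(' : Char) = ')') from by decide]
            exact ih (k + 1) First (Stack - 1) hdrop'
              (by rw [hbsum1, hw]; ring)
              (by rw [hFirst, if_congr hiff rfl rfl])
        · -- other character: both skip
          have hw : pvW c = 0 := by simp [pvW, hc1, hc2]
          rw [pvAGo_cons_other S _ _ _ _ c hc1 hc2,
              pvBGo_cons_skip (h := fun h => hc2 h.1), hcast]
          have hiff : '(' ∈ l.take (k + 1) ↔ '(' ∈ l.take k := by
            rw [htake]; simp [show ¬(('(' : Char) = c) from fun h => hc1 h.symm]
          exact ih (k + 1) First Stack hdrop'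
            (by rw [hbsum1, hw]; ring)
            (by rw [hFirst, if_congr hiff rfl rfl])

-- ===== VERDICT (by name: the statement is the Claim_ definition above) =====
theorem GetSubstring_spec : Claim_equal_GetSubstring := by
  intro S _ _
  unfold Spec_GetSubstring GetSubstring GetSubstring_alt
  have h := pv_main S S.toList 0 (-1) 0 (by simp) (by simp [pvBsum]) (by simp)
  simp only [Nat.cast_zero] at h
  simp only [PySem.Str.find_eq]
  have hts : ("(" : String).toList = ['('] := rfl
  rw [hts, h]
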